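-- pv_equiv track=rewrite | github.com/2021WB15454/BUDDY_2.0 | buddy_core/nlp/advanced_intent_classifier.py | _is_contextually_relevant
-- ===== SOURCE A (Python) =====
-- from typing import Dict, List, Any, Optional, Tuple
--
-- def _is_contextually_relevant(intent: str, context: List[Dict]) -> bool:
--     """Check if intent is contextually relevant to conversation history"""
--
--     # Intent continuation patterns
--     continuation_patterns = {
--         'email_send': ['email_check', 'contact_find', 'email_reply'],
--         'calendar_schedule': ['calendar_check', 'reminder_create', 'timezone_convert'],
--         'weather_query': ['weather_forecast', 'navigation_start', 'travel'],
--         'music_play': ['volume_control', 'music_skip', 'music_search'],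
--         'navigation_start': ['traffic_check', 'location_find', 'weather_query']
--     }
--
--     # Get recent intents from context
--     recent_intents = [
--         msg.get('metadata', {}).get('intent', '')
--         for msg in context[-3:]
--     ]
--
--     # Check if current intent continues the conversation theme
--     for recent_intent in recent_intents:
--         if recent_intent in continuation_patterns:
--             if intent in continuation_patterns[recent_intent]:
--                 return True
--         if intent in continuation_patterns:
--             if recent_intent in continuation_patterns[intent]:
--                 return True
--
--     return False
-- ===== SOURCE B (Python) =====
-- def _is_contextually_relevant(intent, context):
--     """Check if intent is contextually relevant to conversation history"""
--
--     # The continuation patterns, flattened into an undirected edge list.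
--     edges = [
--         ('email_send', 'email_check'), ('email_send', 'contact_find'), ('email_send', 'email_reply'),
--         ('calendar_schedule', 'calendar_check'), ('calendar_schedule', 'reminder_create'), ('calendar_schedule', 'timezone_convert'),
--         ('weather_query', 'weather_forecast'), ('weather_query', 'navigation_start'), ('weather_query', 'travel'),
--         ('music_play', 'volume_control'), ('music_play', 'music_skip'), ('music_play', 'music_search'),
--         ('navigation_start', 'traffic_check'), ('navigation_start', 'location_find'), ('navigation_start', 'weather_query'),
--     ]
--
--     recent = {msg.get('metadata', {}).get('intent', '') for msg in context[-3:]}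
--
--     # Scan the edges instead of the recent intents: an edge is a hit when it
--     # joins `intent` (on either side) to some recent intent.
--     return any((a == intent and b in recent) or (b == intent and a in recent)
--                for a, b in edges)
-- ===== Notes on version B (the rewrite author's own statement) =====
-- stated objective: alternative
-- what changed: B discards the dict entirely: the patterns are flattened into an undirected edge list, the recent intents are collected into a set, and the loop runs over the 15 edges checking whether one touches both `intent` and a recent intent, instead of A's loop over recents with two dict lookups each.
import Mathlib
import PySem

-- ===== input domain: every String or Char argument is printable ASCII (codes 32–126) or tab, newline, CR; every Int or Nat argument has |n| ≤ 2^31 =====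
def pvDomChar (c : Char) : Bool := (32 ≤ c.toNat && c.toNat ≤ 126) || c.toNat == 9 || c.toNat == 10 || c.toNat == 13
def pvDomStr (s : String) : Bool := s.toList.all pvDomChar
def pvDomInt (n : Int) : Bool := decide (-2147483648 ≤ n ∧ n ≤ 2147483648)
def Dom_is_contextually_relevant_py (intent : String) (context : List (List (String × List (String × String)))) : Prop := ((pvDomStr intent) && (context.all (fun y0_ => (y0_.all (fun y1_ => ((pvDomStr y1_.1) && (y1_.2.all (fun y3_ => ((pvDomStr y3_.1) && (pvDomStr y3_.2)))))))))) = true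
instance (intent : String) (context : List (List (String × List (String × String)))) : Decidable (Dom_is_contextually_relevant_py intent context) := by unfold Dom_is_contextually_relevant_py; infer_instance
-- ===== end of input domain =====

-- B drops the dict: the patterns are flattened into an undirected edge list, the last-3 intents are
-- collected into a set, and the loop runs over the edges instead of over the recents (objective: alternative).

-- recent_intents = [msg.get('metadata', {}).get('intent', '') for msg in context[-3:]]  (the same comprehension in A and B)
def recentIntents (context : List (List (String × List (String × String)))) : List String :=
  (PySem.List.slice context (some (-3)) none).map
    (fun msg => PySem.Dict.getD (PySem.Dict.mk ((PySem.Dict.mk msg).getD "metadata" [])) "intent" "")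

-- ===== PORT A =====
-- the continuation-pattern dict A carries verbatim
def contPatterns : PySem.Dict String (List String) := PySem.Dict.ofList [
  ("email_send", ["email_check", "contact_find", "email_reply"]),
  ("calendar_schedule", ["calendar_check", "reminder_create", "timezone_convert"]),
  ("weather_query", ["weather_forecast", "navigation_start", "travel"]),
  ("music_play", ["volume_control", "music_skip", "music_search"]),
  ("navigation_start", ["traffic_check", "location_find", "weather_query"])]

-- A's for-loop with its two early returns, as structural recursion
def loopA (intent : String) : List String → Bool
  | [] => false
  | r :: rest =>
    if contPatterns.contains r && (contPatterns.getD r []).contains intent then true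
    else if contPatterns.contains intent && (contPatterns.getD intent []).contains r then true
    else loopA intent rest

def is_contextually_relevant_py (intent : String) (context : List (List (String × List (String × String)))) : Bool :=
  loopA intent (recentIntents context)

-- ===== PORT B =====
-- B's flattened undirected edge list
def edgesList : List (String × String) := [
  ("email_send", "email_check"), ("email_send", "contact_find"), ("email_send", "email_reply"),
  ("calendar_schedule", "calendar_check"), ("calendar_schedule", "reminder_create"), ("calendar_schedule", "timezone_convert"),
  ("weather_query", "weather_forecast"), ("weather_query", "navigation_start"), ("weather_query", "travel"),
  ("music_play", "volume_control"), ("music_play", "music_skip"), ("music_play", "music_search"),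
  ("navigation_start", "traffic_check"), ("navigation_start", "location_find"), ("navigation_start", "weather_query")]

-- recent = {…set comprehension…};  any(… for a, b in edges)
def is_contextually_relevant_py_alt (intent : String) (context : List (List (String × List (String × String)))) : Bool :=
  let recent : PySem.Set String := PySem.Set.ofList (recentIntents context)
  edgesList.any (fun e =>
    (e.1 == intent && PySem.Set.contains recent e.2) || (e.2 == intent && PySem.Set.contains recent e.1))

-- ===== PRECONDITION & SPEC =====
def Spec_is_contextually_relevant_py (intent : String) (context : List (List (String × List (String × String)))) (out : Bool) : Prop := out = is_contextually_relevant_py_alt intent context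
instance (intent : String) (context : List (List (String × List (String × String)))) (out : Bool) : Decidable (Spec_is_contextually_relevant_py intent context out) := by unfold Spec_is_contextually_relevant_py; infer_instance

-- ===== CLAIM (what is proved, stated in full; the proofs are below) =====
def Claim_equal_is_contextually_relevant_py : Prop := ∀ (intent : String) (context : List (List (String × List (String × String)))), Dom_is_contextually_relevant_py intent context → Spec_is_contextually_relevant_py intent context (is_contextually_relevant_py intent context)

-- ===== LEMMAS AND PROOFS =====

-- the per-element test of A's loop
def condA (intent r : String) : Bool :=
  (contPatterns.contains r && (contPatterns.getD r []).contains intent) ||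
  (contPatterns.contains intent && (contPatterns.getD intent []).contains r)

theorem loopA_eq_any (intent : String) (rs : List String) : loopA intent rs = rs.any (condA intent) := by
  induction rs with
  | nil => simp [loopA]
  | cons r rest ih =>
    simp only [loopA, List.any_cons, ih, condA]
    simp [Bool.or_assoc]

-- guarded double lookup on an assoc list with distinct keys is an `any` over its items
theorem key_lookup_any (y : String) : ∀ (l : List (String × List String)),
    (l.map Prod.fst).Nodup → ∀ (x : String),
    ((PySem.Dict.mk l).contains x && ((PySem.Dict.mk l).getD x []).contains y)
      = l.any (fun p => p.1 == x && p.2.contains y) := by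
  intro l
  induction l with
  | nil => intro _ x; simp [PySem.Dict.contains, PySem.Dict.getD, PySem.Dict.get?]
  | cons kv rest ih =>
    intro hnd x
    simp only [List.map_cons, List.nodup_cons] at hnd
    simp only [PySem.Dict.contains, PySem.Dict.getD, PySem.Dict.get?, List.any_cons,
      List.find?_cons]
    by_cases hk : (kv.1 == x) = true
    · have hx : kv.1 = x := eq_of_beq hk
      have h0 : (rest.any fun p => p.1 == x && decide (y ∈ p.2)) = false := by
        rw [List.any_eq_false]
        intro p hp
        have hne : p.1 ≠ x := fun he => hnd.1 (by rw [hx, ← he]; exact List.mem_map_of_mem hp)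
        simp [hne]
      simp [hk, h0]
    · have hrec := ih hnd.2 x
      simp only [PySem.Dict.contains, PySem.Dict.getD, PySem.Dict.get?] at hrec
      simp at hrec
      simpa [hk] using hrec

theorem nodup_keys_contPatterns : (contPatterns.items.map Prod.fst).Nodup := by decide

-- an edge of B's flat list is exactly a key/value pair of A's dict
theorem pair_mem_edges (a b : String) :
    (a, b) ∈ edgesList ↔ ∃ p ∈ contPatterns.items, p.1 = a ∧ b ∈ p.2 := by
  have hitems : contPatterns.items = [
    ("email_send", ["email_check", "contact_find", "email_reply"]),
    ("calendar_schedule", ["calendar_check", "reminder_create", "timezone_convert"]),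
    ("weather_query", ["weather_forecast", "navigation_start", "travel"]),
    ("music_play", ["volume_control", "music_skip", "music_search"]),
    ("navigation_start", ["traffic_check", "location_find", "weather_query"])] := by rfl
  rw [hitems]
  simp [edgesList, List.mem_cons, Prod.ext_iff, or_and_right, exists_or, and_assoc, and_or_left]
  constructor
  · rintro (⟨rfl, rfl⟩|⟨rfl, rfl⟩|⟨rfl, rfl⟩|⟨rfl, rfl⟩|⟨rfl, rfl⟩|⟨rfl, rfl⟩|⟨rfl, rfl⟩|⟨rfl, rfl⟩|⟨rfl, rfl⟩|⟨rfl, rfl⟩|⟨rfl, rfl⟩|⟨rfl, rfl⟩|⟨rfl, rfl⟩|⟨rfl, rfl⟩|⟨rfl, rfl⟩) <;> decide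
  · rintro ((⟨rfl, rfl⟩|⟨rfl, rfl⟩|⟨rfl, rfl⟩)|(⟨rfl, rfl⟩|⟨rfl, rfl⟩|⟨rfl, rfl⟩)|(⟨rfl, rfl⟩|⟨rfl, rfl⟩|⟨rfl, rfl⟩)|(⟨rfl, rfl⟩|⟨rfl, rfl⟩|⟨rfl, rfl⟩)|⟨rfl, rfl⟩|⟨rfl, rfl⟩|⟨rfl, rfl⟩) <;> decide

-- A's per-element test, characterised through the edge list
theorem condA_iff (intent r : String) :
    condA intent r = true ↔ (r, intent) ∈ edgesList ∨ (intent, r) ∈ edgesList := by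
  unfold condA
  rw [key_lookup_any intent contPatterns.items nodup_keys_contPatterns r,
      key_lookup_any r contPatterns.items nodup_keys_contPatterns intent]
  simp only [Bool.or_eq_true, List.any_eq_true, Bool.and_eq_true, beq_iff_eq,
    List.contains_iff_mem, pair_mem_edges]

-- ===== VERDICT (by name: the statement is the Claim_ definition above) =====
theorem is_contextually_relevant_py_spec : Claim_equal_is_contextually_relevant_py := by
  intro intent context _
  unfold Spec_is_contextually_relevant_py
  unfold is_contextually_relevant_py is_contextually_relevant_py_alt
  rw [loopA_eq_any]
  set rs := recentIntents context with hrs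
  rw [Bool.eq_iff_iff]
  simp only [List.any_eq_true, condA_iff, Bool.or_eq_true, Bool.and_eq_true, beq_iff_eq,
    PySem.Set.contains_eq_listContains, List.contains_iff_mem, PySem.Set.mem_ofList]
  constructor
  · rintro ⟨r, hr, h | h⟩
    · exact ⟨(r, intent), h, Or.inr ⟨rfl, hr⟩⟩
    · exact ⟨(intent, r), h, Or.inl ⟨rfl, hr⟩⟩
  · rintro ⟨e, he, ⟨h1, h2⟩ | ⟨h1, h2⟩⟩
    · exact ⟨e.2, h2, Or.inr (by rwa [← h1])⟩
    · exact ⟨e.1, h2, Or.inl (by rwa [← h1])⟩
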